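-- pv_equiv track=rewrite | github.com/Rango94/leetcode | 数组山谷.py | find_v
-- ===== SOURCE A (Python) =====
-- def find_v(s):
--     out=[]
--     max_len=0
--     for i in range(1,len(s)-1):
--         tmp=find_max(s,i)
--         if tmp>max_len:
--             max_len=tmp
--     return max_len
--
-- def find_max(s,idx):
--     i=idx-1
--     j=idx+1
--     if s[i]<s[idx] or s[j]<s[idx]:
--         return 0
--     while i>0 and s[i]>s[i+1]:
--         i-=1
--     while j<len(s) and s[j]>s[j-1]:
--         j+=1
--     return j-i-1
-- ===== SOURCE B (Python) =====
-- def runs(s):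
--     # out[k] = length of the maximal strictly-decreasing run ending at index k
--     out = []
--     prev = None
--     d = 0
--     for x in s:
--         d = d + 1 if (prev is not None and prev > x) else 0
--         out.append(d)
--         prev = x
--     return out
--
--
-- def find_v(s):
--     n = len(s)
--     down = runs(s)                  # strict decreases ending at k
--     up = runs(s[::-1])[::-1]        # strict increases starting at k
--     best = 0
--     for i in range(1, n - 1):
--         if s[i - 1] >= s[i] and s[i + 1] >= s[i]:
--             v = down[i] + up[i] + 1
--             if v > best:
--                 best = v
--     return best
-- ===== Notes on version B (the rewrite author's own statement) =====
-- stated objective: alternative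
-- what changed: Replaced the per-index bidirectional while-loop scans (find_max called at every interior index) by two precomputed run-length arrays (strict-decrease run ending at k; strict-increase run starting at k via the same helper on the reversed list) and a single pass over interior weak local minima; B does not reproduce A's left-boundary off-by-one.
-- intended difference: On inputs where a strictly decreasing prefix starting at the first element leads into the strictly longest valley of the array, A returns that valley's length minus one (its left scan 'while i>0' stops before extending the run to the first index, e.g. A([2,1,2])=2) while B returns the full valley length (B([2,1,2])=3), which is the intended count. — e.g. on find_v([2, 1, 2]): A returns 2, B returns 3
import Mathlib
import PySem

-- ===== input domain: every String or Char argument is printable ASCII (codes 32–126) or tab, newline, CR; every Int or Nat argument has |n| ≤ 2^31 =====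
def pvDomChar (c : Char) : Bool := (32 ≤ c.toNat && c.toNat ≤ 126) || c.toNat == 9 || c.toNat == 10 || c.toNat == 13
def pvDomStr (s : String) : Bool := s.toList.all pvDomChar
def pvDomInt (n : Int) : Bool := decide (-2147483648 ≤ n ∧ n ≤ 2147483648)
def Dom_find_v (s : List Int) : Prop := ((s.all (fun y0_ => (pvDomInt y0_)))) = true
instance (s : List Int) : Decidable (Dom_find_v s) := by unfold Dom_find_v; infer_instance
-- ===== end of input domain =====

-- B replaces A's per-index bidirectional while-loop scans by two precomputed run-length
-- arrays and one linear pass over interior weak local minima (objective: alternative);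
-- on inputs where the array's strictly longest valley starts at index 0, A undercounts
-- it by one and B returns the full length (stated as D_ below).

-- ===== PORT A =====
-- every index A reads is in range (the loop guards keep 0 ≤ index < len), so getD is exact here
def pvGetA (s : List Int) (k : Nat) : Int := s.getD k 0

-- 'while i>0 and s[i]>s[i+1]: i-=1' — returns the final i, starting from i
def leftW (s : List Int) : Nat → Nat
  | 0 => 0
  | (i+1) => if pvGetA s (i+1) > pvGetA s (i+2) then leftW s i else i+1

-- 'while j<len(s) and s[j]>s[j-1]: j+=1' — fuel-counted (the loop runs < len(s) times since
-- j strictly increases and stays < len(s)); returns the final j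
def rightWF (s : List Int) : Nat → Nat → Nat
  | 0, j => j
  | (f+1), j => if j < s.length ∧ pvGetA s j > pvGetA s (j-1) then rightWF s f (j+1) else j

def rightW (s : List Int) (j : Nat) : Nat := rightWF s s.length j

def find_max (s : List Int) (idx : Nat) : Int :=
  if pvGetA s (idx-1) < pvGetA s idx ∨ pvGetA s (idx+1) < pvGetA s idx then 0
  else (rightW s (idx+1) : Int) - (leftW s (idx-1) : Int) - 1

-- loop body of find_v: 'tmp=find_max(s,i); if tmp>max_len: max_len=tmp'
def stepA (s : List Int) (max_len : Int) (i : Nat) : Int :=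
  let tmp := find_max s i
  if tmp > max_len then tmp else max_len

def find_v (s : List Int) : Int :=
  (List.range' 1 (s.length - 2)).foldl (stepA s) 0

-- ===== PORT B =====
-- runs(s): out[k] = length of the maximal strictly-decreasing run ending at index k
def runsAux (prev : Int) (d : Nat) : List Int → List Nat
  | [] => []
  | x :: xs => (if prev > x then d+1 else 0) :: runsAux x (if prev > x then d+1 else 0) xs

def runs : List Int → List Nat
  | [] => []
  | x :: xs => 0 :: runsAux x 0 xs

-- loop body of B's single pass over the interior indices
def stepB (s : List Int) (down inc : List Nat) (best : Int) (i : Nat) : Int :=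
  if pvGetA s (i-1) ≥ pvGetA s i ∧ pvGetA s (i+1) ≥ pvGetA s i then
    let v : Int := ((down.getD i 0 + inc.getD i 0 + 1 : Nat) : Int)
    if v > best then v else best
  else best

def find_v_alt (s : List Int) : Int :=
  let down := runs s
  let inc := (runs s.reverse).reverse
  (List.range' 1 (s.length - 2)).foldl (stepB s down inc) 0

-- ===== PRECONDITION & SPEC =====
-- mono s a b 1: s strictly decreases on indices [a, a+b]; mono s a b 0: strictly increases.
abbrev mono (s : List Int) (a b d : Nat) : Prop :=
  ∀ k ∈ List.range' a b, pvGetA s (k + d) < pvGetA s (k + 1 - d)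

-- V s a e: the window [a, a+e] is a valley: strictly decreasing to some interior weak
-- local minimum m (weak: ¬(s[m+1] < s[m])), then strictly increasing to a+e.
abbrev V (s : List Int) (a e : Nat) : Prop :=
  ∃ m ∈ List.range' 1 (s.length - 2),
    mono s a (m - a) 1 ∧ ¬ mono s m 1 1 ∧ mono s m (a + e - m) 0

-- On inputs where a strictly decreasing prefix starting at the first element leads into
-- the strictly longest valley of the array, A returns that valley's length minus one (its
-- left scan 'while i>0' stops before extending the run to the first index) while B returns
-- the full valley length, which is the intended count.  Closed form: some valley window
-- starts at the first index and no valley window of the same length starts later.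
def D_find_v (s : List Int) : Prop :=
  ∃ e ∈ List.range s.length, V s 0 e ∧ ∀ a ∈ List.range' 1 (s.length - 1 - e), ¬ V s a e

instance (s : List Int) : Decidable (D_find_v s) := by unfold D_find_v; infer_instance

def Spec_find_v (s : List Int) (out : Int) : Prop := ¬ D_find_v s → out = find_v_alt s
instance (s : List Int) (out : Int) : Decidable (Spec_find_v s out) := by unfold Spec_find_v; infer_instance

def pvDiffWitness_find_v : List Int := [2, 1, 2]
def pvDiffWitnessOut_find_v : Int × Int := (2, 3)

-- ===== CLAIM (what is proved, stated in full; the proofs are below) =====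
def Claim_unchanged_find_v : Prop := ∀ (s : List Int), Dom_find_v s → Spec_find_v s (find_v s)
def Claim_changed_find_v : Prop := Dom_find_v (pvDiffWitness_find_v) ∧ D_find_v (pvDiffWitness_find_v) ∧ find_v (pvDiffWitness_find_v) = pvDiffWitnessOut_find_v.1 ∧ find_v_alt (pvDiffWitness_find_v) = pvDiffWitnessOut_find_v.2 ∧ pvDiffWitnessOut_find_v.1 ≠ pvDiffWitnessOut_find_v.2
def Claim_exact_find_v : Prop := ∀ (s : List Int), Dom_find_v s → D_find_v s → find_v s ≠ find_v_alt s

-- ===== LEMMAS AND PROOFS =====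

-- proof-side run-length functions (used only to analyse the two ports and D_):
-- length of the maximal strictly-decreasing run ending at index k
def downF (s : List Int) : Nat → Nat
  | 0 => 0
  | (k+1) => if pvGetA s k > pvGetA s (k+1) then downF s k + 1 else 0

-- length of the maximal strictly-increasing run starting at index k (fuel-counted)
def incAux (s : List Int) : Nat → Nat → Nat
  | 0, _ => 0
  | (f+1), k => if k+1 < s.length ∧ pvGetA s (k+1) > pvGetA s k then incAux s f (k+1) + 1 else 0

def incF (s : List Int) (k : Nat) : Nat := incAux s s.length k

-- index i is a weak local minimum
abbrev weakMin (s : List Int) (i : Nat) : Prop :=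
  pvGetA s (i-1) ≥ pvGetA s i ∧ pvGetA s (i+1) ≥ pvGetA s i

-- length of the valley whose bottom is index i
def valley (s : List Int) (i : Nat) : Nat := downF s i + incF s i + 1

-- D_find_v restated through the run-length functions (proved equivalent in D_iff below)
def Dold (s : List Int) : Prop :=
  ∃ p ∈ List.range s.length, 1 ≤ p ∧ p + 2 ≤ s.length ∧ downF s p = p ∧ weakMin s p ∧
    ∀ m ∈ List.range s.length, 1 ≤ m → m + 2 ≤ s.length → m ≠ p → weakMin s m →
      valley s m < valley s p

-- per-index value computed by A resp. B at an interior index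
def fA (s : List Int) (i : Nat) : Int :=
  if weakMin s i then ((incF s i + min (downF s i) (i-1) + 1 : Nat) : Int) else 0

def fB (s : List Int) (i : Nat) : Int :=
  if weakMin s i then ((downF s i + incF s i + 1 : Nat) : Int) else 0

-- running maximum of f over a list of indices
def mfold (f : Nat → Int) (a : Int) (l : List Nat) : Int :=
  l.foldl (fun m i => max m (f i)) a

theorem if_gt_eq_max (a b : Int) : (if b > a then b else a) = max a b := by
  rw [max_def]; split_ifs <;> omega

-- ---- fuel plumbing for incF / rightW ----

theorem incAux_congr (s : List Int) :
    ∀ f1 f2 k, s.length ≤ k + f1 → s.length ≤ k + f2 → incAux s f1 k = incAux s f2 k := by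
  intro f1
  induction f1 with
  | zero =>
    intro f2 k h1 h2
    cases f2 with
    | zero => rfl
    | succ f2 => rw [incAux, incAux, if_neg (by rintro ⟨h, -⟩; omega)]
  | succ f1 ih =>
    intro f2 k h1 h2
    cases f2 with
    | zero => rw [incAux, incAux, if_neg (by rintro ⟨h, -⟩; omega)]
    | succ f2 =>
      rw [incAux, incAux]
      by_cases hc : k+1 < s.length ∧ pvGetA s (k+1) > pvGetA s k
      · rw [if_pos hc, if_pos hc, ih f2 (k+1) (by omega) (by omega)]
      · rw [if_neg hc, if_neg hc]

theorem incF_rec (s : List Int) (k : Nat) :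
    incF s k = if k+1 < s.length ∧ pvGetA s (k+1) > pvGetA s k then incF s (k+1) + 1 else 0 := by
  unfold incF
  cases hl : s.length with
  | zero => rw [incAux, if_neg (by rintro ⟨h, -⟩; omega)]
  | succ L =>
    rw [incAux]
    by_cases hc : k+1 < s.length ∧ pvGetA s (k+1) > pvGetA s k
    · rw [hl] at hc ⊢
      rw [if_pos hc, if_pos hc, incAux_congr s L (L+1) (k+1) (by omega) (by omega)]
    · rw [hl] at hc ⊢
      rw [if_neg hc, if_neg hc]

theorem rightWF_eq (s : List Int) :
    ∀ f k, rightWF s f (k+1) = (k+1) + incAux s f k := by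
  intro f
  induction f with
  | zero => intro k; rfl
  | succ f ih =>
    intro k
    rw [rightWF, incAux]
    have hk : k + 1 - 1 = k := by omega
    rw [hk]
    by_cases hc : k+1 < s.length ∧ pvGetA s (k+1) > pvGetA s k
    · rw [if_pos hc, if_pos hc, ih (k+1)]; omega
    · rw [if_neg hc, if_neg hc]

theorem rightW_eq (s : List Int) (k : Nat) : rightW s (k+1) = (k+1) + incF s k :=
  rightWF_eq s s.length k

-- ---- downF facts ----

theorem downF_le (s : List Int) : ∀ k, downF s k ≤ k := by
  intro k
  induction k with
  | zero => exact le_refl 0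
  | succ k ih => rw [downF]; split_ifs <;> omega

theorem downF_prefix (s : List Int) :
    ∀ m, downF s m = m → ∀ k, k < m → pvGetA s k > pvGetA s (k+1) := by
  intro m
  induction m with
  | zero => intro _ k hk; omega
  | succ m ih =>
    intro hm k hk
    rw [downF] at hm
    by_cases hc : pvGetA s m > pvGetA s (m+1)
    · rw [if_pos hc] at hm
      rcases Nat.lt_succ_iff_lt_or_eq.mp hk with h | h
      · exact ih (by omega) k h
      · subst h; exact hc
    · rw [if_neg hc] at hm; omega

-- at most one interior index is both a weak minimum and the end of a full decreasing prefix
theorem uniq_prefix_min (s : List Int) (p m : Nat)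
    (hdp : downF s p = p) (hwp : weakMin s p)
    (hdm : downF s m = m) (hwm : weakMin s m) (hne : p ≠ m) : False := by
  rcases Nat.lt_or_ge p m with h | h
  · exact absurd (downF_prefix s m hdm p h) (by exact not_lt.mpr hwp.2)
  · have h' : m < p := by omega
    exact absurd (downF_prefix s p hdp m h') (by exact not_lt.mpr hwm.2)

-- ---- characterizations of downF / incF by interval conditions ----

theorem downF_of_prefix (s : List Int) :
    ∀ p, (∀ k, k < p → pvGetA s k > pvGetA s (k+1)) → downF s p = p := by
  intro p
  induction p with
  | zero => intro _; rfl
  | succ p ih =>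
    intro h
    rw [downF, if_pos (h p (by omega)), ih (fun k hk => h k (by omega))]

theorem downF_run (s : List Int) :
    ∀ m k, m - downF s m ≤ k → k < m → pvGetA s k > pvGetA s (k+1) := by
  intro m
  induction m with
  | zero => intro k h1 h2; omega
  | succ m ih =>
    intro k h1 h2
    rw [downF] at h1
    by_cases hc : pvGetA s m > pvGetA s (m+1)
    · rw [if_pos hc] at h1
      by_cases hk : k = m
      · subst hk; exact hc
      · exact ih k (by omega) (by omega)
    · rw [if_neg hc] at h1; omega

theorem downF_max (s : List Int) :
    ∀ m a, a ≤ m → (∀ k, a ≤ k → k < m → pvGetA s k > pvGetA s (k+1)) →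
      m - a ≤ downF s m := by
  intro m
  induction m with
  | zero => intro a _ _; omega
  | succ m ih =>
    intro a ha h
    by_cases ham : a = m + 1
    · omega
    · rw [downF, if_pos (h m (by omega) (by omega))]
      have := ih a (by omega) (fun k h1 h2 => h k h1 (by omega))
      omega

theorem incF_le (s : List Int) :
    ∀ t p, s.length - p ≤ t → p < s.length → p + incF s p < s.length := by
  intro t
  induction t with
  | zero => intro p h hp; omega
  | succ t ih =>
    intro p h hp
    rw [incF_rec]
    by_cases hc : p+1 < s.length ∧ pvGetA s (p+1) > pvGetA s p
    · rw [if_pos hc]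
      have := ih (p+1) (by omega) hc.1
      omega
    · rw [if_neg hc]; omega

theorem incF_run (s : List Int) :
    ∀ t p, s.length - p ≤ t → ∀ k, p ≤ k → k < p + incF s p →
      pvGetA s k < pvGetA s (k+1) := by
  intro t
  induction t with
  | zero =>
    intro p h k h1 h2
    rw [incF_rec, if_neg (by rintro ⟨hh, -⟩; omega)] at h2
    omega
  | succ t ih =>
    intro p h k h1 h2
    rw [incF_rec] at h2
    by_cases hc : p+1 < s.length ∧ pvGetA s (p+1) > pvGetA s p
    · rw [if_pos hc] at h2
      by_cases hk : k = p
      · subst hk; exact hc.2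
      · exact ih (p+1) (by omega) k (by omega) (by omega)
    · rw [if_neg hc] at h2; omega

theorem incF_max (s : List Int) :
    ∀ t p b, s.length - p ≤ t → p ≤ b → b < s.length →
      (∀ k, p ≤ k → k < b → pvGetA s k < pvGetA s (k+1)) → b - p ≤ incF s p := by
  intro t
  induction t with
  | zero =>
    intro p b h h1 h2 _
    omega
  | succ t ih =>
    intro p b h h1 h2 hruns
    by_cases hpb : p = b
    · omega
    · rw [incF_rec, if_pos ⟨by omega, hruns p le_rfl (by omega)⟩]
      have := ih (p+1) b (by omega) (by omega) h2 (fun k hk1 hk2 => hruns k (by omega) hk2)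
      omega

-- the closed-form change region coincides with the run-length formulation
theorem mono_dec (s : List Int) (a b : Nat) :
    mono s a b 1 ↔ ∀ k, a ≤ k → k < a + b → pvGetA s (k+1) < pvGetA s k := by
  simp only [mono, List.mem_range'_1]
  constructor
  · intro h k h1 h2
    simpa using h k ⟨h1, h2⟩
  · intro h k hk
    simpa using h k hk.1 hk.2

theorem mono_inc (s : List Int) (a b : Nat) :
    mono s a b 0 ↔ ∀ k, a ≤ k → k < a + b → pvGetA s k < pvGetA s (k+1) := by
  simp only [mono, List.mem_range'_1]
  constructor
  · intro h k h1 h2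
    simpa using h k ⟨h1, h2⟩
  · intro h k hk
    simpa using h k hk.1 hk.2

theorem wk_iff (s : List Int) (m : Nat) :
    ¬ mono s m 1 1 ↔ pvGetA s m ≤ pvGetA s (m+1) := by
  rw [mono_dec]
  constructor
  · intro h
    by_contra hlt
    push Not at hlt
    exact h (fun k h1 h2 => by rw [show k = m by omega]; exact hlt)
  · intro hle hmono
    exact absurd (hmono m le_rfl (by omega)) (not_lt.mpr hle)

-- under the run-length hypotheses of Dold, no strictly increasing run starting at an
-- interior index is as long as the start valley's span p + incF p
theorem inc_lt (s : List Int) (p : Nat) (h1p : 1 ≤ p) (hdp : downF s p = p)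
    (hall : ∀ m ∈ List.range s.length, 1 ≤ m → m + 2 ≤ s.length → m ≠ p → weakMin s m →
      valley s m < valley s p) :
    ∀ j x, x ≤ j → 1 ≤ x → x + 2 ≤ s.length → incF s x < p + incF s p := by
  intro j
  induction j with
  | zero => intro x hx h1 h2; omega
  | succ j ih =>
    intro x hx h1 h2
    by_contra hge
    push Not at hge
    have hinc1 : 1 ≤ incF s x := by omega
    have hcond : x + 1 < s.length ∧ pvGetA s (x+1) > pvGetA s x := by
      by_contra hc
      rw [incF_rec, if_neg hc] at hinc1
      omega
    by_cases hxw : pvGetA s (x-1) ≥ pvGetA s x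
    · have hw : weakMin s x := ⟨hxw, le_of_lt hcond.2⟩
      by_cases hxp : x = p
      · subst hxp; omega
      · have hv := hall x (List.mem_range.mpr (by omega)) h1 h2 hxp hw
        unfold valley at hv
        rw [hdp] at hv
        omega
    · push Not at hxw
      by_cases hx1 : x = 1
      · subst hx1
        have hpair := downF_prefix s p hdp 0 (by omega)
        simp only [show (1:Nat) - 1 = 0 from rfl] at hxw
        simp only [Nat.zero_add] at hpair
        omega
      · have hx' : x - 1 + 1 = x := by omega
        have hrec : incF s (x-1) = incF s x + 1 := by
          rw [incF_rec, hx', if_pos ⟨by omega, hxw⟩]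
        have := ih (x-1) (by omega) (by omega) (by omega)
        omega

-- the closed-form change region coincides with the run-length formulation
theorem D_iff (s : List Int) : D_find_v s ↔ Dold s := by
  constructor
  · rintro ⟨e, her, ⟨p, hpr, hdec, hwk, hinc⟩, hriv⟩
    have hen : e < s.length := List.mem_range.mp her
    have hpb := List.mem_range'_1.mp hpr
    have h1p : 1 ≤ p := hpb.1
    have hpn : p + 2 ≤ s.length := by omega
    have hdecp : ∀ k, k < p → pvGetA s (k+1) < pvGetA s k := by
      intro k hk
      exact (mono_dec s 0 (p - 0)).mp hdec k (by omega) (by omega)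
    have hdp : downF s p = p := downF_of_prefix s p hdecp
    have hwp : weakMin s p := by
      constructor
      · have := hdecp (p-1) (by omega)
        rw [show p - 1 + 1 = p by omega] at this
        exact le_of_lt this
      · exact (wk_iff s p).mp hwk
    have hincp : ∀ k, p ≤ k → k < e → pvGetA s k < pvGetA s (k+1) := by
      intro k h1 h2
      exact (mono_inc s p (0 + e - p)).mp hinc k h1 (by omega)
    have heTle : e ≤ p + incF s p := by
      by_cases hpe : p ≤ e
      · have := incF_max s s.length p e (by omega) hpe hen hincp
        omega
      · omega
    refine ⟨p, List.mem_range.mpr (by omega), h1p, hpn, hdp, hwp, ?_⟩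
    intro m hmr h1m h2m hmp hwm
    unfold valley
    rw [hdp]
    by_contra hbig
    push Not at hbig
    have hdle := downF_le s m
    have hbm : m + incF s m < s.length := incF_le s s.length m (by omega) (by omega)
    by_cases hde : e ≤ downF s m
    · by_cases ha0 : m - e = 0
      · have hdm : downF s m = m := by omega
        exact uniq_prefix_min s p m hdp hwp hdm hwm (Ne.symm hmp)
      · refine hriv (m - e) (List.mem_range'_1.mpr ⟨by omega, by omega⟩)
          ⟨m, List.mem_range'_1.mpr ⟨h1m, by omega⟩,
            (mono_dec s (m-e) (m - (m-e))).mpr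
              (fun k h1 h2 => downF_run s m k (by omega) (by omega)),
            (wk_iff s m).mpr hwm.2,
            (mono_inc s m ((m-e) + e - m)).mpr (fun k h1 h2 => by omega)⟩
    · push Not at hde
      have ha1 : 1 ≤ m - downF s m := by
        by_contra h0
        have hdm : downF s m = m := by omega
        exact uniq_prefix_min s p m hdp hwp hdm hwm (Ne.symm hmp)
      refine hriv (m - downF s m) (List.mem_range'_1.mpr ⟨ha1, by omega⟩)
        ⟨m, List.mem_range'_1.mpr ⟨h1m, by omega⟩,
          (mono_dec s (m - downF s m) (m - (m - downF s m))).mpr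
            (fun k h1 h2 => downF_run s m k (by omega) (by omega)),
          (wk_iff s m).mpr hwm.2,
          (mono_inc s m ((m - downF s m) + e - m)).mpr
            (fun k h1 h2 => incF_run s s.length m (by omega) k h1 (by omega))⟩
  · rintro ⟨p, hpr, h1p, h2p, hdp, hwp, hall⟩
    have hpn : p < s.length := List.mem_range.mp hpr
    have hen : p + incF s p < s.length := incF_le s s.length p (by omega) hpn
    refine ⟨p + incF s p, List.mem_range.mpr hen,
      ⟨p, List.mem_range'_1.mpr ⟨h1p, by omega⟩,
        (mono_dec s 0 (p - 0)).mpr (fun k h1 h2 => downF_prefix s p hdp k (by omega)),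
        (wk_iff s p).mpr hwp.2,
        (mono_inc s p (0 + (p + incF s p) - p)).mpr
          (fun k h1 h2 => incF_run s s.length p (by omega) k h1 (by omega))⟩, ?_⟩
    intro a har hV
    obtain ⟨m, hmr, hdec, hwk, hinc⟩ := hV
    have hab := List.mem_range'_1.mp har
    have hmb := List.mem_range'_1.mp hmr
    have hwkm : pvGetA s m ≤ pvGetA s (m+1) := (wk_iff s m).mp hwk
    have hdecm := (mono_dec s a (m - a)).mp hdec
    have hincm := (mono_inc s m (a + (p + incF s p) - m)).mp hinc
    by_cases hma : m ≤ a + (p + incF s p)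
    · have hiF : a + (p + incF s p) - m ≤ incF s m :=
        incF_max s s.length m (a + (p + incF s p)) (by omega) hma (by omega)
          (fun k h1 h2 => hincm k h1 (by omega))
      by_cases haml : a < m
      · have hwmL : pvGetA s (m-1) ≥ pvGetA s m := by
          have := hdecm (m-1) (by omega) (by omega)
          rw [show m - 1 + 1 = m by omega] at this
          exact le_of_lt this
        have hwm : weakMin s m := ⟨hwmL, hwkm⟩
        have hdF : m - a ≤ downF s m := downF_max s m a (by omega)
          (fun k h1 h2 => hdecm k h1 (by omega))
        by_cases hmp : m = p
        · subst hmp; omega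
        · have hv := hall m (List.mem_range.mpr (by omega)) (by omega) (by omega) hmp hwm
          unfold valley at hv
          rw [hdp] at hv
          omega
      · have := inc_lt s p h1p hdp hall s.length m (by omega) (by omega) (by omega)
        omega
    · push Not at hma
      have hdF : m - a ≤ downF s m := downF_max s m a (by omega)
        (fun k h1 h2 => hdecm k h1 (by omega))
      have hwmL : pvGetA s (m-1) ≥ pvGetA s m := by
        have := hdecm (m-1) (by omega) (by omega)
        rw [show m - 1 + 1 = m by omega] at this
        exact le_of_lt this
      have hwm : weakMin s m := ⟨hwmL, hwkm⟩
      by_cases hmp : m = p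
      · subst hmp; omega
      · have hv := hall m (List.mem_range.mpr (by omega)) (by omega) (by omega) hmp hwm
        unfold valley at hv
        rw [hdp] at hv
        omega

-- ---- A's per-index value ----

theorem leftW_eq (s : List Int) : ∀ i, leftW s i = i - min (downF s (i+1)) i := by
  intro i
  induction i with
  | zero => simp [leftW]
  | succ i ih =>
    have hl : leftW s (i+1) = if pvGetA s (i+1) > pvGetA s (i+2) then leftW s i else i+1 := rfl
    have hd : downF s (i+2) = if pvGetA s (i+1) > pvGetA s (i+2) then downF s (i+1) + 1 else 0 := rfl
    rw [hl, hd]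
    by_cases hc : pvGetA s (i+1) > pvGetA s (i+2)
    · rw [if_pos hc, if_pos hc, ih]; omega
    · rw [if_neg hc, if_neg hc]; omega

theorem find_max_eq (s : List Int) (i : Nat) (h1 : 1 ≤ i) :
    find_max s i = fA s i := by
  unfold find_max fA
  by_cases hlt : pvGetA s (i-1) < pvGetA s i ∨ pvGetA s (i+1) < pvGetA s i
  · rw [if_pos hlt, if_neg (by rintro ⟨ha, hb⟩; rcases hlt with h | h <;> omega)]
  · push Not at hlt
    rw [if_neg (by rintro (h | h) <;> omega), if_pos ⟨hlt.1, hlt.2⟩]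
    have hi : i - 1 + 1 = i := by omega
    rw [show i + 1 = (i - 1) + 1 + 1 by omega, rightW_eq s, hi]
    rw [show leftW s (i-1) = (i-1) - min (downF s (i-1+1)) (i-1) from leftW_eq s (i-1), hi]
    have := Nat.min_le_right (downF s i) (i-1)
    omega

theorem stepA_eq (s : List Int) (i : Nat) (m : Int) (h1 : 1 ≤ i) :
    stepA s m i = max m (fA s i) := by
  unfold stepA
  rw [find_max_eq s i h1, if_gt_eq_max]

-- ---- B's per-index value ----

theorem runsAux_length (prev : Int) (d : Nat) (xs : List Int) :
    (runsAux prev d xs).length = xs.length := by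
  induction xs generalizing prev d with
  | nil => rfl
  | cons x xs ih => simp [runsAux, ih]

theorem runs_length (s : List Int) : (runs s).length = s.length := by
  cases s with
  | nil => rfl
  | cons x xs => simp [runs, runsAux_length]

theorem runsAux_getD_succ : ∀ (xs : List Int) (prev : Int) (d k : Nat), k + 1 < xs.length →
    (runsAux prev d xs).getD (k+1) 0 =
      if xs.getD k 0 > xs.getD (k+1) 0 then (runsAux prev d xs).getD k 0 + 1 else 0 := by
  intro xs
  induction xs with
  | nil => intro prev d k h; simp at h
  | cons x xs ih =>
    intro prev d k h
    cases k with
    | zero =>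
      cases xs with
      | nil => simp at h
      | cons y t => simp [runsAux]
    | succ k =>
      have h' : k + 1 < xs.length := by simp at h; omega
      simp only [runsAux, List.getD_cons_succ]
      exact ih x (if x < prev then d+1 else 0) k h'

theorem runs_rec (s : List Int) (k : Nat) (h : k + 1 < s.length) :
    (runs s).getD (k+1) 0 = if pvGetA s k > pvGetA s (k+1) then (runs s).getD k 0 + 1 else 0 := by
  cases s with
  | nil => simp at h
  | cons x xs =>
    cases k with
    | zero =>
      cases xs with
      | nil => simp at h
      | cons y t => simp [runs, runsAux, pvGetA]
    | succ k =>
      have h' : k + 1 < xs.length := by simp at h; omega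
      simp only [runs, List.getD_cons_succ, pvGetA]
      rw [runsAux_getD_succ xs x 0 k h']

theorem runs_getD_eq_downF (s : List Int) : ∀ k, k < s.length → (runs s).getD k 0 = downF s k := by
  intro k
  induction k with
  | zero =>
    intro h
    cases s with
    | nil => simp at h
    | cons x xs => rfl
  | succ k ih =>
    intro h
    rw [runs_rec s k h, ih (by omega)]
    rfl

theorem pvGetA_reverse (s : List Int) (t : Nat) (h : t < s.length) :
    pvGetA s.reverse t = pvGetA s (s.length - 1 - t) := by
  unfold pvGetA
  rw [List.getD_eq_getElem _ _ (by simpa using h), List.getD_eq_getElem _ _ (by omega)]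
  rw [List.getElem_reverse]

theorem downF_reverse (s : List Int) :
    ∀ m, m < s.length → downF s.reverse m = incF s (s.length - 1 - m) := by
  intro m
  induction m with
  | zero =>
    intro h
    rw [incF_rec, if_neg (by rintro ⟨h1, -⟩; omega)]
    rfl
  | succ m ih =>
    intro h
    have hrev1 : pvGetA s.reverse m = pvGetA s (s.length - 1 - m) := pvGetA_reverse s m (by omega)
    have hrev2 : pvGetA s.reverse (m+1) = pvGetA s (s.length - 1 - (m+1)) := pvGetA_reverse s (m+1) h
    have harith : s.length - 1 - (m+1) + 1 = s.length - 1 - m := by omega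
    have hd : downF s.reverse (m+1) =
        if pvGetA s.reverse m > pvGetA s.reverse (m+1) then downF s.reverse m + 1 else 0 := rfl
    rw [hd, incF_rec s (s.length - 1 - (m+1)), harith, hrev1, hrev2, ih (by omega)]
    by_cases hc : pvGetA s (s.length - 1 - m) > pvGetA s (s.length - 1 - (m+1))
    · rw [if_pos hc, if_pos ⟨by omega, hc⟩]
    · rw [if_neg hc, if_neg (by rintro ⟨-, h2⟩; exact hc h2)]

theorem inc_getD (s : List Int) (i : Nat) (hi : i < s.length) :
    ((runs s.reverse).reverse).getD i 0 = incF s i := by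
  have hl : (runs s.reverse).length = s.length := by
    rw [runs_length, List.length_reverse]
  have h1 : i < ((runs s.reverse).reverse).length := by
    rw [List.length_reverse, hl]; exact hi
  have h2 : (runs s.reverse).length - 1 - i < (runs s.reverse).length := by omega
  rw [List.getD_eq_getElem _ _ h1, List.getElem_reverse, ← List.getD_eq_getElem _ 0 h2]
  rw [hl]
  rw [runs_getD_eq_downF s.reverse (s.length - 1 - i) (by rw [List.length_reverse]; omega)]
  rw [downF_reverse s (s.length - 1 - i) (by omega)]
  have : s.length - 1 - (s.length - 1 - i) = i := by omega
  rw [this]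

theorem stepB_eq (s : List Int) (i : Nat) (m : Int) (hi : i < s.length) (hm : 0 ≤ m) :
    stepB s (runs s) ((runs s.reverse).reverse) m i = max m (fB s i) := by
  unfold stepB fB
  by_cases hw : weakMin s i
  · rw [if_pos ⟨hw.1, hw.2⟩, if_pos hw]
    simp only [runs_getD_eq_downF s i hi, inc_getD s i hi]
    rw [if_gt_eq_max]
  · rw [if_neg (by rintro ⟨ha, hb⟩; exact hw ⟨ha, hb⟩), if_neg hw]
    omega

-- ---- fold machinery ----

theorem mfold_ge_init (f : Nat → Int) : ∀ (l : List Nat) (a : Int), a ≤ mfold f a l := by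
  intro l
  induction l with
  | nil => intro a; exact le_refl a
  | cons x t ih =>
    intro a
    exact le_trans (le_max_left a (f x)) (ih (max a (f x)))

theorem mfold_ge_mem (f : Nat → Int) :
    ∀ (l : List Nat) (a : Int) (i : Nat), i ∈ l → f i ≤ mfold f a l := by
  intro l
  induction l with
  | nil => intro a i hi; simp at hi
  | cons x t ih =>
    intro a i hi
    rcases List.mem_cons.mp hi with h | h
    · subst h
      exact le_trans (le_max_right a (f i)) (mfold_ge_init f t _)
    · exact ih _ i h

theorem mfold_cases (f : Nat → Int) :
    ∀ (l : List Nat) (a : Int), mfold f a l = a ∨ ∃ i ∈ l, mfold f a l = f i := by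
  intro l
  induction l with
  | nil => intro a; exact Or.inl rfl
  | cons x t ih =>
    intro a
    rcases ih (max a (f x)) with h | ⟨i, hi, h⟩
    · rcases max_choice a (f x) with hm | hm
      · exact Or.inl (by rw [mfold, List.foldl_cons, ← mfold]; rw [h, hm])
      · exact Or.inr ⟨x, List.mem_cons_self, by rw [mfold, List.foldl_cons, ← mfold]; rw [h, hm]⟩
    · exact Or.inr ⟨i, List.mem_cons_of_mem x hi, by rw [mfold, List.foldl_cons, ← mfold]; exact h⟩

theorem mfold_congr (f g : Nat → Int) :
    ∀ (l : List Nat) (a : Int), (∀ i ∈ l, f i = g i) → mfold f a l = mfold g a l := by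
  intro l
  induction l with
  | nil => intro a _; rfl
  | cons x t ih =>
    intro a h
    simp only [mfold, List.foldl_cons]
    rw [h x List.mem_cons_self]
    exact ih _ (fun i hi => h i (List.mem_cons_of_mem x hi))

theorem find_v_eq_mfold (s : List Int) :
    find_v s = mfold (fA s) 0 (List.range' 1 (s.length - 2)) := by
  unfold find_v mfold
  have : ∀ l : List Nat, (∀ i ∈ l, 1 ≤ i) → ∀ m : Int,
      l.foldl (stepA s) m = l.foldl (fun m i => max m (fA s i)) m := by
    intro l
    induction l with
    | nil => intro _ m; rfl
    | cons x t ih =>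
      intro h m
      rw [List.foldl_cons, List.foldl_cons, stepA_eq s x m (h x List.mem_cons_self)]
      exact ih (fun i hi => h i (List.mem_cons_of_mem x hi)) _
  exact this _ (fun i hi => by rw [List.mem_range'_1] at hi; omega) 0

theorem find_v_alt_eq_mfold (s : List Int) :
    find_v_alt s = mfold (fB s) 0 (List.range' 1 (s.length - 2)) := by
  unfold find_v_alt mfold
  have : ∀ l : List Nat, (∀ i ∈ l, i < s.length) → ∀ m : Int, 0 ≤ m →
      l.foldl (stepB s (runs s) ((runs s.reverse).reverse)) m
        = l.foldl (fun m i => max m (fB s i)) m := by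
    intro l
    induction l with
    | nil => intro _ m _; rfl
    | cons x t ih =>
      intro h m hm
      rw [List.foldl_cons, List.foldl_cons, stepB_eq s x m (h x List.mem_cons_self) hm]
      exact ih (fun i hi => h i (List.mem_cons_of_mem x hi)) _
        (le_trans hm (le_max_left m (fB s x)))
  exact this _ (fun i hi => by rw [List.mem_range'_1] at hi; omega) 0 (le_refl 0)

-- ---- pointwise comparison of fA and fB ----

theorem fA_le_fB (s : List Int) (i : Nat) : fA s i ≤ fB s i := by
  unfold fA fB
  split_ifs with hw
  · have := Nat.min_le_left (downF s i) (i-1)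
    exact_mod_cast by omega
  · exact le_refl 0

theorem fA_eq_fB_of_not_prefix (s : List Int) (i : Nat) (h1 : 1 ≤ i)
    (h : ¬ (downF s i = i ∧ weakMin s i)) : fA s i = fB s i := by
  unfold fA fB
  by_cases hw : weakMin s i
  · rw [if_pos hw, if_pos hw]
    have hd : downF s i ≠ i := fun hdi => h ⟨hdi, hw⟩
    have hle := downF_le s i
    have : min (downF s i) (i-1) = downF s i := Nat.min_eq_left (by omega)
    rw [this]
    congr 1
    omega
  · rw [if_neg hw, if_neg hw]

theorem fA_at_prefix (s : List Int) (p : Nat) (h1 : 1 ≤ p) (hdp : downF s p = p)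
    (hwp : weakMin s p) : fA s p = ((incF s p + p : Nat) : Int) := by
  unfold fA
  rw [if_pos hwp, hdp]
  congr 1
  have : min p (p-1) = p - 1 := Nat.min_eq_right (by omega)
  omega

theorem fB_val (s : List Int) (i : Nat) (hw : weakMin s i) :
    fB s i = ((valley s i : Nat) : Int) := by
  unfold fB valley
  rw [if_pos hw]

-- ===== VERDICT helpers: main proofs =====

theorem find_v_spec : Claim_unchanged_find_v := by
  intro s _hdom
  unfold Spec_find_v
  intro hnD
  rw [find_v_eq_mfold, find_v_alt_eq_mfold]
  set l := List.range' 1 (s.length - 2) with hl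
  have hmem : ∀ i ∈ l, 1 ≤ i ∧ i + 1 < s.length := by
    intro i hi; rw [hl, List.mem_range'_1] at hi; omega
  by_cases hex : ∃ p ∈ l, downF s p = p ∧ weakMin s p
  · obtain ⟨p, hpl, hdp, hwp⟩ := hex
    obtain ⟨h1p, h2p⟩ := hmem p hpl
    -- extract from ¬D_ a rival valley at least as long
    rw [D_iff] at hnD
    unfold Dold at hnD
    push Not at hnD
    obtain ⟨m, hmr, h1m, h2m, hmp, hwm, hv⟩ :=
      hnD p (List.mem_range.mpr (by omega)) h1p (by omega) hdp hwp
    have hml : m ∈ l := by rw [hl, List.mem_range'_1]; omega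
    have hfm : fA s m = fB s m :=
      fA_eq_fB_of_not_prefix s m h1m
        (fun ⟨hdm, hwm'⟩ => uniq_prefix_min s p m hdp hwp hdm hwm' (Ne.symm hmp))
    apply le_antisymm
    · rcases mfold_cases (fA s) l 0 with h | ⟨i, hi, h⟩
      · rw [h]; exact mfold_ge_init (fB s) l 0
      · rw [h]; exact le_trans (fA_le_fB s i) (mfold_ge_mem (fB s) l 0 i hi)
    · rcases mfold_cases (fB s) l 0 with h | ⟨i, hi, h⟩
      · rw [h]; exact mfold_ge_init (fA s) l 0
      · rw [h]
        by_cases hip : downF s i = i ∧ weakMin s i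
        · have hip' : i = p := by
            by_contra hne
            exact uniq_prefix_min s p i hdp hwp hip.1 hip.2 (Ne.symm hne)
          subst hip'
          calc fB s i = ((valley s i : Nat) : Int) := fB_val s i hwp
            _ ≤ ((valley s m : Nat) : Int) := by exact_mod_cast hv
            _ = fB s m := (fB_val s m hwm).symm
            _ = fA s m := hfm.symm
            _ ≤ mfold (fA s) 0 l := mfold_ge_mem (fA s) l 0 m hml
        · obtain ⟨h1i, _⟩ := hmem i hi
          rw [← fA_eq_fB_of_not_prefix s i h1i hip]
          exact mfold_ge_mem (fA s) l 0 i hi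
  · -- no full-prefix weak minimum: the two folds agree pointwise
    push Not at hex
    exact mfold_congr (fA s) (fB s) l 0 (fun i hi =>
      fA_eq_fB_of_not_prefix s i (hmem i hi).1 (fun hc => hex i hi hc.1 hc.2))

theorem find_v_tight : Claim_exact_find_v := by
  intro s _hdom hD
  rw [D_iff] at hD
  obtain ⟨p, hpr, h1p, h2p, hdp, hwp, hall⟩ := hD
  rw [find_v_eq_mfold, find_v_alt_eq_mfold]
  set l := List.range' 1 (s.length - 2) with hl
  have hmem : ∀ i ∈ l, 1 ≤ i ∧ i + 1 < s.length := by
    intro i hi; rw [hl, List.mem_range'_1] at hi; omega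
  have hpl : p ∈ l := by rw [hl, List.mem_range'_1]; omega
  have hAp : fA s p = ((incF s p + p : Nat) : Int) := fA_at_prefix s p h1p hdp hwp
  have hBp : fB s p = ((valley s p : Nat) : Int) := fB_val s p hwp
  -- every other index is dominated
  have hdomA : ∀ i ∈ l, fA s i ≤ fA s p := by
    intro i hi
    obtain ⟨h1i, h2i⟩ := hmem i hi
    by_cases hip : i = p
    · subst hip; exact le_refl _
    · have hnp : ¬ (downF s i = i ∧ weakMin s i) :=
        fun ⟨hdi, hwi⟩ => uniq_prefix_min s p i hdp hwp hdi hwi (Ne.symm hip)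
      rw [fA_eq_fB_of_not_prefix s i h1i hnp]
      by_cases hw : weakMin s i
      · have hv := hall i (List.mem_range.mpr (by omega)) h1i (by omega) hip hw
        rw [fB_val s i hw, hAp]
        have : valley s p = downF s p + incF s p + 1 := rfl
        rw [this, hdp] at hv
        exact_mod_cast by omega
      · rw [show fB s i = 0 from by unfold fB; rw [if_neg hw], hAp]
        exact Int.natCast_nonneg _
  have hdomB : ∀ i ∈ l, fB s i ≤ fB s p := by
    intro i hi
    obtain ⟨h1i, h2i⟩ := hmem i hi
    by_cases hip : i = p
    · subst hip; exact le_refl _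
    · by_cases hw : weakMin s i
      · have hv := hall i (List.mem_range.mpr (by omega)) h1i (by omega) hip hw
        rw [fB_val s i hw, hBp]
        exact_mod_cast by omega
      · rw [show fB s i = 0 from by unfold fB; rw [if_neg hw], hBp]
        exact Int.natCast_nonneg _
  have hMA : mfold (fA s) 0 l = fA s p := by
    apply le_antisymm
    · rcases mfold_cases (fA s) l 0 with h | ⟨i, hi, h⟩
      · rw [h, hAp]; exact Int.natCast_nonneg _
      · rw [h]; exact hdomA i hi
    · exact mfold_ge_mem (fA s) l 0 p hpl
  have hMB : mfold (fB s) 0 l = fB s p := by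
    apply le_antisymm
    · rcases mfold_cases (fB s) l 0 with h | ⟨i, hi, h⟩
      · rw [h, hBp]; exact Int.natCast_nonneg _
      · rw [h]; exact hdomB i hi
    · exact mfold_ge_mem (fB s) l 0 p hpl
  rw [hMA, hMB, hAp, hBp]
  have : valley s p = downF s p + incF s p + 1 := rfl
  rw [this, hdp]
  intro hcontra
  have : incF s p + p = p + incF s p + 1 := by exact_mod_cast hcontra
  omega

theorem find_v_changed : Claim_changed_find_v := by
  unfold Claim_changed_find_v; decide
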